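-- pv_equiv track=rewrite | github.com/javedinfinite/practice_questions | moons_umbrella.py | get_substr_count
-- ===== SOURCE A (Python) =====
-- def get_substr_count(Str, target):
--
--     no_of_match = 0
--     len_str = len(Str)
--
--     count = 0
--     for i in range(len_str):
--         if (Str[i] == target[no_of_match]):
--             no_of_match += 1
--         if (no_of_match == len(target)):
--             count+=1
--             no_of_match = 0
--     return count
-- ===== SOURCE B (Python) =====
-- def get_substr_count(Str, target):
--     # Build a position index: for each character, the sorted list of its indices in Str.
--     pos = {}
--     for idx, ch in enumerate(Str):
--         pos.setdefault(ch, []).append(idx)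
--     count = 0
--     i = 0
--     while True:
--         for c in target:
--             lst = pos.get(c)
--             if lst is None:
--                 return count
--             # binary search: leftmost position in lst that is >= i
--             lo, hi = 0, len(lst)
--             while lo < hi:
--                 mid = (lo + hi) // 2
--                 if lst[mid] < i:
--                     lo = mid + 1
--                 else:
--                     hi = mid
--             if lo == len(lst):
--                 return count
--             i = lst[lo] + 1
--         count += 1
-- ===== Notes on version B (the rewrite author's own statement) =====
-- stated objective: alternative
-- what changed: Replaces A's single character-by-character scan with a match pointer by first building a per-character position index (dict of sorted index lists) and then locating each target character with a hand-written binary search over that index, so Str is never rescanned character by character.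
-- outside the precondition, e.g. on get_substr_count('ab', ''): A raises IndexError, B does not finish within the time limit; on get_substr_count('', ''): A returns 0, B does not finish within the time limit
import Mathlib
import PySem

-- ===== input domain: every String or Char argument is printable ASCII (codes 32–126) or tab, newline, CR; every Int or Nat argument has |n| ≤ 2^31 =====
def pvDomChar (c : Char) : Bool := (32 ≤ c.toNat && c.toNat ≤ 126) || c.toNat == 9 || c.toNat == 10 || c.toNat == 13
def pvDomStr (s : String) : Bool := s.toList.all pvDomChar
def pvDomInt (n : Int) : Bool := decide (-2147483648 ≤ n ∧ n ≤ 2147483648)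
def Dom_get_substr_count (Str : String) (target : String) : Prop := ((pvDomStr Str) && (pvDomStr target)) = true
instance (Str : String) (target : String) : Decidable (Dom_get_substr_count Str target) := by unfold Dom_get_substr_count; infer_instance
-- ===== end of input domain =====

-- B builds a per-character position index of Str once and then finds each target character by
-- binary search in that index, instead of A's single match-pointer scan (objective: alternative).

-- ===== PORT A =====
-- one step of A's for-loop body: state = (no_of_match, count); none = IndexError on target[no_of_match]
def aStep (t : List Char) (st : Option (Nat × Int)) (x : Char) : Option (Nat × Int) :=
  match st with
  | none => none
  | some (m, c) =>
    match PySem.List.pyGet? t (m : Int) with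
    | none => none
    | some ch =>
      let m' := if x == ch then m + 1 else m
      if m' = t.length then some (0, c + 1) else some (m', c)

def get_substr_count (Str : String) (target : String) : Int :=
  -- 'for i in range(len(Str)): … Str[i] …' visits exactly the characters of Str in order
  match Str.toList.foldl (aStep target.toList) (some (0, 0)) with
  | none => 0            -- unreachable under Pre_: target[no_of_match] raised IndexError
  | some (_, c) => c

-- ===== PORT B =====
-- 'for idx, ch in enumerate(Str): pos.setdefault(ch, []).append(idx)'
def bPos (s : List Char) : PySem.Dict Char (List Int) :=
  (PySem.List.enumerate s 0).foldl
    (fun d p => d.insert p.2 ((d.getD p.2 []) ++ [p.1])) PySem.Dict.empty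

-- the hand-written binary search: leftmost position in lst that is >= i
-- (mid is always < lst.length when read, so getD equals Python's lst[mid])
def bLB (lst : List Int) (i : Int) (lo hi : Nat) : Nat :=
  if _h : lo < hi then
    let mid := (lo + hi) / 2
    if lst.getD mid 0 < i then bLB lst i (mid + 1) hi else bLB lst i lo mid
  else lo
termination_by hi - lo
decreasing_by all_goals omega

-- body of one iteration of 'for c in target': none = 'return count', some i' = new value of i
def bStep (d : PySem.Dict Char (List Int)) (c : Char) (i : Int) : Option Int :=
  match d.get? c with
  | none => none
  | some lst =>
    let lo := bLB lst i 0 lst.length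
    if lo = lst.length then none else some (lst.getD lo 0 + 1)

-- 'for c in target' loop
def bInner (d : PySem.Dict Char (List Int)) : List Char → Int → Option Int
  | [], i => some i
  | c :: rest, i =>
    match bStep d c i with
    | none => none
    | some i' => bInner d rest i'

-- 'while True' loop; the fuel bounds its iterations (each full match advances i by ≥ 1)
def bOuter (d : PySem.Dict Char (List Int)) (t : List Char) : Nat → Int → Int → Int
  | 0, _, count => count
  | fuel + 1, i, count =>
    match bInner d t i with
    | none => count
    | some i' => bOuter d t fuel i' (count + 1)

def get_substr_count_alt (Str : String) (target : String) : Int :=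
  bOuter (bPos Str.toList) target.toList (Str.toList.length + 1) 0 0

-- ===== PRECONDITION & SPEC =====
-- Pre_ excludes an empty target: there Python A raises IndexError for nonempty Str, and for
-- Str = "" it returns 0 while Python B loops forever (cited in claim.json).
def Pre_get_substr_count (Str : String) (target : String) : Prop := target ≠ ""
instance (Str : String) (target : String) : Decidable (Pre_get_substr_count Str target) := by
  unfold Pre_get_substr_count; infer_instance

def pvWitness_get_substr_count : String × String := ("abcabcab", "ab")

def Spec_get_substr_count (Str : String) (target : String) (out : Int) : Prop := out = get_substr_count_alt Str target
instance (Str : String) (target : String) (out : Int) : Decidable (Spec_get_substr_count Str target out) := by unfold Spec_get_substr_count; infer_instance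

-- ===== CLAIM (what is proved, stated in full; the proofs are below) =====
def Claim_equal_get_substr_count : Prop := ∀ (Str : String) (target : String), Dom_get_substr_count Str target → Pre_get_substr_count Str target → Spec_get_substr_count Str target (get_substr_count Str target)

-- ===== LEMMAS AND PROOFS =====

-- final count of A's loop, run from state (m, c) over the remaining characters xs
def aCount (t xs : List Char) (m : Nat) (c : Int) : Int :=
  match xs.foldl (aStep t) (some (m, c)) with
  | none => 0
  | some (_, c) => c

-- the positions (as Int, offset by n) of character c in a character list
def idxs (c : Char) : List Char → Int → List Int
  | [], _ => []
  | x :: xs, n => (if x == c then [n] else []) ++ idxs c xs (n + 1)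

lemma idxs_mem (c : Char) : ∀ (s : List Char) (n : Int) (x : Int),
    x ∈ idxs c s n ↔ ∃ k : Nat, k < s.length ∧ s[k]? = some c ∧ x = n + k := by
  intro s
  induction s with
  | nil => simp [idxs]
  | cons a l ih =>
    intro n x
    simp only [idxs, List.mem_append]
    constructor
    · rintro (h | h)
      · by_cases ha : a == c
        · simp [ha] at h
          exact ⟨0, by simp, by simpa using ha, by omega⟩
        · simp [ha] at h
      · obtain ⟨k, hk, hg, hx⟩ := (ih (n + 1) x).mp h
        exact ⟨k + 1, by simpa using hk, by simpa using hg, by push_cast; omega⟩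
    · rintro ⟨k, hk, hg, hx⟩
      cases k with
      | zero =>
        left
        simp at hg
        simp [hg, hx]
      | succ k =>
        right
        refine (ih (n + 1) x).mpr ⟨k, by simpa using hk, by simpa using hg, by push_cast at hx ⊢; omega⟩

lemma idxs_lb (c : Char) : ∀ (s : List Char) (n : Int) (x : Int), x ∈ idxs c s n → n ≤ x := by
  intro s n x hx
  obtain ⟨k, -, -, hk⟩ := (idxs_mem c s n x).mp hx
  omega

lemma idxs_sorted (c : Char) : ∀ (s : List Char) (n : Int), (idxs c s n).Pairwise (· < ·) := by
  intro s
  induction s with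
  | nil => intro n; simp [idxs]
  | cons a l ih =>
    intro n
    by_cases ha : a == c
    · simp only [idxs, ha, if_pos]
      refine List.pairwise_append.mpr ⟨by simp, ih (n + 1), ?_⟩
      intro x hx y hy
      simp at hx
      have := idxs_lb c l (n + 1) y hy
      omega
    · simpa [idxs, ha] using ih (n + 1)

-- characterization of the position index built by B
lemma bPos_get (s : List Char) (c : Char) :
    (bPos s).get? c = match idxs c s 0 with | [] => none | l => some l := by
  have key : ∀ (s : List Char) (n : Int) (d : PySem.Dict Char (List Int)),
      ((PySem.List.enumerate s n).foldl
        (fun d p => d.insert p.2 ((d.getD p.2 []) ++ [p.1])) d).get? c =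
      match d.get? c with
      | none => (match idxs c s n with | [] => none | l => some l)
      | some l => some (l ++ idxs c s n) := by
    intro s
    induction s with
    | nil => intro n d; simp [idxs]; cases d.get? c <;> simp
    | cons a l ih =>
      intro n d
      rw [PySem.List.enumerate_cons, List.foldl_cons, ih]
      by_cases hac : a = c
      · subst hac
        rw [PySem.Dict.get?_insert]
        simp only [if_pos rfl, idxs, beq_self_eq_true, if_pos]
        rw [PySem.Dict.getD_eq_get?_getD]
        cases d.get? a <;> simp
      · rw [PySem.Dict.get?_insert]
        rw [if_neg (by exact fun h => hac h.symm)]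
        have hbeq : (a == c) = false := by simpa using hac
        simp only [idxs, hbeq, if_neg, Bool.false_eq_true, not_false_iff, List.nil_append]
  rw [bPos, key]
  simp [PySem.Dict.get?_empty]

-- binary search correctness (lst strictly increasing)
lemma bLB_spec (lst : List Int) (i : Int) (hs : lst.Pairwise (· < ·)) :
    ∀ (fuel lo hi : Nat), hi - lo ≤ fuel → lo ≤ hi → hi ≤ lst.length →
      (∀ m, m < lo → lst.getD m 0 < i) →
      (∀ m, hi ≤ m → m < lst.length → i ≤ lst.getD m 0) →
      bLB lst i lo hi ≤ lst.length ∧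
      (∀ m, m < bLB lst i lo hi → lst.getD m 0 < i) ∧
      (bLB lst i lo hi < lst.length → i ≤ lst.getD (bLB lst i lo hi) 0) := by
  have hmono : ∀ a b : Nat, a < b → b < lst.length → lst.getD a 0 < lst.getD b 0 := by
    intro a b hab hb
    have ha : a < lst.length := by omega
    rw [List.getD_eq_getElem?_getD, List.getD_eq_getElem?_getD,
        List.getElem?_eq_getElem ha, List.getElem?_eq_getElem hb]
    exact (List.pairwise_iff_getElem.mp hs) a b ha hb hab
  intro fuel
  induction fuel with
  | zero =>
    intro lo hi hf hlh hhl Hlo Hhi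
    have : lo = hi := by omega
    subst this
    rw [bLB, dif_neg (by omega)]
    exact ⟨by omega, Hlo, fun h => Hhi lo (le_refl _) h⟩
  | succ n ih =>
    intro lo hi hf hlh hhl Hlo Hhi
    by_cases h : lo < hi
    · rw [bLB, dif_pos h]
      set mid := (lo + hi) / 2 with hmid
      have hmlt : mid < hi := by omega
      have hmge : lo ≤ mid := by omega
      have hmlen : mid < lst.length := by omega
      by_cases hc : lst.getD mid 0 < i
      · rw [if_pos hc]
        refine ih (mid + 1) hi (by omega) (by omega) hhl ?_ Hhi
        intro m hm
        rcases Nat.lt_or_ge m lo with hml | hml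
        · exact Hlo m hml
        · rcases Nat.lt_or_ge m mid with hmm | hmm
          · exact lt_trans (hmono m mid hmm hmlen) hc
          · have : m = mid := by omega
            subst this; exact hc
      · rw [if_neg hc]
        refine ih lo mid (by omega) (by omega) (by omega) Hlo ?_
        intro m hm1 hm2
        rcases Nat.lt_or_ge mid m with hmm | hmm
        · exact le_trans (le_of_not_gt hc) (le_of_lt (hmono mid m hmm hm2))
        · have : m = mid := by omega
          subst this; exact le_of_not_gt hc
    · rw [bLB, dif_neg h]
      have : lo = hi := by omega
      subst this
      exact ⟨by omega, Hlo, fun hl => Hhi lo (le_refl _) hl⟩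

-- B's one-character step equals "first occurrence of c at index ≥ i", via findIdx? on drop i
lemma step_eq (s : List Char) (c : Char) (i : Nat) (hi : i ≤ s.length) :
    bStep (bPos s) c (i : Int) =
      match (s.drop i).findIdx? (· == c) with
      | none => none
      | some k => some ((i + k + 1 : Nat) : Int) := by
  unfold bStep
  rw [bPos_get]
  by_cases hnil : idxs c s 0 = []
  case pos =>
    rw [hnil]
    -- c does not occur in s at all, so not in s.drop i either
    have hnone : (s.drop i).findIdx? (· == c) = none := by
      rw [List.findIdx?_eq_none_iff]
      intro x hx
      by_contra hbe
      simp only [Bool.not_eq_false, beq_iff_eq] at hbe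
      subst hbe
      obtain ⟨k, hk, hkg⟩ := List.getElem_of_mem (List.mem_of_mem_drop hx)
      have : (0 : Int) + k ∈ idxs x s 0 := by
        refine (idxs_mem x s 0 (0 + k)).mpr ⟨k, hk, ?_, rfl⟩
        rw [List.getElem?_eq_getElem hk, hkg]
      rw [hnil] at this
      simp at this
    rw [hnone]
  case neg =>
    have hsome : (match idxs c s 0 with | [] => none | l => some l) = some (idxs c s 0) := by
      cases h : idxs c s 0 with
      | nil => exact absurd h hnil
      | cons a l => simp [h]
    rw [hsome]
    set lst := idxs c s 0 with hlst
    have hsorted : lst.Pairwise (· < ·) := idxs_sorted c s 0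
    have hmem : ∀ x : Int, x ∈ lst ↔ ∃ k : Nat, k < s.length ∧ s[k]? = some c ∧ x = (k : Int) := by
      intro x
      rw [hlst, idxs_mem]
      constructor
      · rintro ⟨k, h1, h2, h3⟩; exact ⟨k, h1, h2, by omega⟩
      · rintro ⟨k, h1, h2, h3⟩; exact ⟨k, h1, h2, by omega⟩
    obtain ⟨hr1, hr2, hr3⟩ := bLB_spec lst (i : Int) hsorted lst.length 0 lst.length
      (by omega) (by omega) (le_refl _) (by omega) (fun m hm1 hm2 => by omega)
    set r := bLB lst (i : Int) 0 lst.length with hr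
    show (if r = lst.length then none else some (lst.getD r 0 + 1)) =
      match (s.drop i).findIdx? (· == c) with
      | none => none
      | some k => some ((i + k + 1 : Nat) : Int)
    by_cases hre : r = lst.length
    · -- every occurrence of c is at an index < i
      have hnone : (s.drop i).findIdx? (· == c) = none := by
        rw [List.findIdx?_eq_none_iff]
        intro x hx
        by_contra hbe
        simp only [Bool.not_eq_false, beq_iff_eq] at hbe
        subst hbe
        obtain ⟨k, hk, hkg⟩ := List.getElem_of_mem hx
        rw [List.length_drop] at hk
        have hg : s[i + k]? = some x := by
          rw [← List.getElem?_drop, List.getElem?_eq_getElem (by rw [List.length_drop]; omega), hkg]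
        have hin : ((i + k : Nat) : Int) ∈ lst := (hmem _).mpr ⟨i + k, by omega, hg, rfl⟩
        obtain ⟨m, hm, hmg⟩ := List.getElem_of_mem hin
        have : lst.getD m 0 < (i : Int) := hr2 m (by omega)
        rw [List.getD_eq_getElem?_getD, List.getElem?_eq_getElem hm, hmg] at this
        simp at this
        omega
      rw [hnone, if_pos hre]
    · rw [if_neg hre]
      have hrlen : r < lst.length := by omega
      have hrg : lst.getD r 0 = lst[r] := by
        rw [List.getD_eq_getElem?_getD, List.getElem?_eq_getElem hrlen]; rfl
      obtain ⟨k, hk, hkg, hkv⟩ := (hmem lst[r]).mp (List.getElem_mem hrlen)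
      have hik : (i : Int) ≤ k := by
        have := hr3 hrlen
        rw [hrg] at this
        omega
      have hikn : i ≤ k := by exact_mod_cast hik
      -- first occurrence of c in s.drop i is at offset k - i
      have hfind : (s.drop i).findIdx? (· == c) = some (k - i) := by
        rw [List.findIdx?_eq_some_iff_getElem]
        have hlen : k - i < (s.drop i).length := by rw [List.length_drop]; omega
        refine ⟨hlen, ?_, ?_⟩
        · have : (s.drop i)[k - i]? = s[k]? := by
            rw [List.getElem?_drop]
            congr 1
            omega
          rw [List.getElem?_eq_getElem hlen] at this
          rw [hkg] at this
          simp at this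
          simp [this]
        · intro j hj
          by_contra hbe
          simp only [Bool.not_eq_false, beq_iff_eq] at hbe
          have hjlen : j < (s.drop i).length := by omega
          have hg : s[i + j]? = some c := by
            rw [← List.getElem?_drop, List.getElem?_eq_getElem hjlen, hbe]
          have hin : ((i + j : Nat) : Int) ∈ lst := (hmem _).mpr ⟨i + j, by
            rw [List.length_drop] at hjlen; omega, hg, rfl⟩
          obtain ⟨m, hm, hmg⟩ := List.getElem_of_mem hin
          have hlt : lst[m] < lst[r] := by
            rw [hmg, hkv]
            push_cast
            omega
          have hmr : m < r := by
            by_contra hge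
            rcases Nat.lt_or_ge r m with hh | hh
            · have := (List.pairwise_iff_getElem.mp hsorted) r m hrlen hm hh
              omega
            · have : m = r := by omega
              subst this
              omega
          have := hr2 m hmr
          rw [List.getD_eq_getElem?_getD, List.getElem?_eq_getElem hm, hmg] at this
          simp at this
          omega
      rw [hfind]
      simp only [hrg, hkv]
      congr 1
      push_cast
      omega

-- final count of A's loop from state (m, c), characterized via findIdx? (same as before)
lemma scan_step (t : List Char) (m : Nat) (hm : m < t.length) :
    ∀ (xs : List Char) (c : Int),
      xs.foldl (aStep t) (some (m, c)) =
        (match xs.findIdx? (· == t[m]) with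
         | none => some (m, c)
         | some k =>
             (xs.drop (k + 1)).foldl (aStep t)
               (if m + 1 = t.length then some (0, c + 1) else some (m + 1, c))) := by
  intro xs
  induction xs with
  | nil => intro c; simp
  | cons x xs ih =>
    intro c
    have hget : PySem.List.pyGet? t (m : Int) = some t[m] := by
      simp [List.getElem?_eq_getElem hm]
    by_cases hx : x == t[m]
    · have hstep : aStep t (some (m, c)) x =
        (if m + 1 = t.length then some (0, c + 1) else some (m + 1, c)) := by
        simp [aStep, hget, hx]
      rw [List.foldl_cons, hstep, List.findIdx?_cons]
      simp [hx]
    · have hmne : m ≠ t.length := by omega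
      have hstep : aStep t (some (m, c)) x = some (m, c) := by
        simp [aStep, hget, hx, hmne]
      rw [List.foldl_cons, hstep, ih c, List.findIdx?_cons]
      simp only [hx]
      cases h : xs.findIdx? (· == t[m]) <;> simp

lemma bInner_bounds (s : List Char) :
    ∀ (r : List Char) (i : Nat), i ≤ s.length →
      ∀ i', bInner (bPos s) r (i : Int) = some i' →
        (i : Int) ≤ i' ∧ i'.toNat ≤ s.length ∧ 0 ≤ i' ∧ (r ≠ [] → (i : Int) < i') := by
  intro r
  induction r with
  | nil =>
    intro i hi i' h
    simp [bInner] at h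
    refine ⟨by omega, by omega, by omega, by simp⟩
  | cons ch rest ih =>
    intro i hi i' h
    simp only [bInner] at h
    rw [step_eq s ch i hi] at h
    cases hf : (s.drop i).findIdx? (· == ch) with
    | none => rw [hf] at h; simp at h
    | some k =>
      rw [hf] at h
      simp only [] at h
      have hk : k < (s.drop i).length := (List.findIdx?_eq_some_iff_getElem.mp hf).1
      rw [List.length_drop] at hk
      obtain ⟨h1, h2, h3, -⟩ := ih (i + k + 1) (by omega) i' h
      exact ⟨by push_cast at h1 ⊢; omega, h2, h3, fun _ => by push_cast at h1 ⊢; omega⟩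

lemma inner_eq (t s : List Char) :
    ∀ (r : List Char) (q i : Nat) (c : Int),
      r ≠ [] → q + r.length = t.length → r = t.drop q → i ≤ s.length →
      aCount t (s.drop i) q c =
        (match bInner (bPos s) r (i : Int) with
         | none => c
         | some i' => aCount t (s.drop i'.toNat) 0 (c + 1)) := by
  intro r
  induction r with
  | nil =>
    intro q i c hne
    exact absurd rfl hne
  | cons ch rest ih =>
    intro q i c _ hlen hdrop hi
    have hq : q < t.length := by simp at hlen; omega
    have hdq := List.drop_eq_getElem_cons hq
    rw [← hdrop] at hdq
    have hch : t[q] = ch := ((List.cons.injEq ..).mp hdq).1.symm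
    have hrest : rest = t.drop (q + 1) := ((List.cons.injEq ..).mp hdq).2
    simp only [bInner]
    rw [step_eq s ch i hi]
    unfold aCount
    rw [scan_step t q hq (s.drop i) c, hch]
    cases hidx : (s.drop i).findIdx? (· == ch) with
    | none => simp
    | some k =>
      have hklen : k < (s.drop i).length := (List.findIdx?_eq_some_iff_getElem.mp hidx).1
      rw [List.length_drop] at hklen
      simp only []
      have hdd : (s.drop i).drop (k + 1) = s.drop (i + (k + 1)) := by
        rw [List.drop_drop]
      by_cases hqe : q + 1 = t.length
      · have hre : rest = [] := by rw [hrest, hqe]; simp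
        subst hre
        rw [if_pos hqe]
        simp only [bInner]
        have htn2 : ((i : Int) + (k : Int) + 1).toNat = i + (k + 1) := by omega
        simp [hdd, htn2]
      · rw [if_neg hqe]
        have hrne : rest ≠ [] := by
          rw [hrest]
          intro hnil
          have hl := congrArg List.length hnil
          simp at hl
          omega
        have hres := ih (q + 1) (i + k + 1) c hrne (by simp at hlen ⊢; omega) hrest (by omega)
        unfold aCount at hres
        rw [hdd]
        have : i + (k + 1) = i + k + 1 := by omega
        rw [this]
        simpa using hres

lemma outer_eq (t s : List Char) (ht : t ≠ []) :
    ∀ (fuel : Nat) (i : Nat) (c : Int), i ≤ s.length → s.length - i < fuel →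
      aCount t (s.drop i) 0 c = bOuter (bPos s) t fuel (i : Int) c := by
  intro fuel
  induction fuel with
  | zero => intro i c hi hf; omega
  | succ n ih =>
    intro i c hi hf
    simp only [bOuter]
    rw [inner_eq t s t 0 i c ht (by omega) (by simp) hi]
    cases hbi : bInner (bPos s) t (i : Int) with
    | none => simp
    | some i' =>
      obtain ⟨h1, h2, h3, h4⟩ := bInner_bounds s t i hi i' hbi
      have hlt := h4 ht
      have hieq : i' = ((i'.toNat : Nat) : Int) := by omega
      simp only []
      rw [hieq, ← ih i'.toNat (c + 1) h2 (by omega)]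
      have htn : ((i'.toNat : Int)).toNat = i'.toNat := by omega
      rw [htn]

theorem toList_ne_nil_of_ne_empty (s : String) (h : s ≠ "") : s.toList ≠ [] := by
  intro hl
  exact h (String.toList_eq_nil_iff.mp hl)

-- ===== VERDICT (by name: the statement is the Claim_ definition above) =====
theorem get_substr_count_spec : Claim_equal_get_substr_count := by
  intro Str target _ hpre
  unfold Spec_get_substr_count get_substr_count get_substr_count_alt
  have ht := toList_ne_nil_of_ne_empty target hpre
  have h := outer_eq target.toList Str.toList ht (Str.toList.length + 1) 0 0
    (by omega) (by omega)
  unfold aCount at h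
  simp only [List.drop_zero, Nat.cast_zero] at h
  cases hfold : List.foldl (aStep target.toList) (some (0, 0)) Str.toList with
  | none => simp only [hfold] at h ⊢; exact h
  | some p => obtain ⟨m, c⟩ := p; simp only [hfold] at h ⊢; exact h
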